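-- pv_equiv track=rewrite | github.com/akshaya-e/RAG-Based-AI-Document-Assistant. | utils.py | create_chat_context
-- ===== SOURCE A (Python) =====
-- def create_chat_context(question, history, max_context_length=2000):
--     """Create context for chat from previous conversations"""
--     if not history:
--         return ""
--
--     context_parts = []
--     current_length = 0
--
--     # Add most recent conversations first
--     for q, a, _, _ in reversed(history):
--         entry = f"Previous Q: {q}\nPrevious A: {a[:200]}...\n"
--         if current_length + len(entry) > max_context_length:
--             break
--         context_parts.insert(0, entry)
--         current_length += len(entry)
--
--     return "\n".join(context_parts) if context_parts else ""
-- ===== SOURCE B (Python) =====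
-- def create_chat_context(question, history, max_context_length=2000):
--     """Create context for chat from previous conversations"""
--     entries = [f"Previous Q: {q}\nPrevious A: {a[:200]}...\n" for q, a, _, _ in history]
--     # remaining = length of the suffix starting at the current entry; an entry is kept
--     # exactly when its suffix fits the cap (suffix sums are nonincreasing, so this
--     # chronological threshold scan selects the same entries as a reverse greedy walk).
--     remaining = sum(len(e) for e in entries)
--     kept = []
--     for e in entries:
--         if remaining <= max_context_length:
--             kept.append(e)
--         remaining -= len(e)
--     return "\n".join(kept)
-- ===== Notes on version B (the rewrite author's own statement) =====
-- stated objective: alternative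
-- what changed: B never walks the history backwards: it precomputes the total formatted length and does one chronological pass keeping an entry exactly when its remaining suffix length fits the cap (valid because entry lengths are nonnegative, so suffix sums are nonincreasing and the threshold test coincides with A's break-from-the-end greedy walk with insert(0)).
import Mathlib
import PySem

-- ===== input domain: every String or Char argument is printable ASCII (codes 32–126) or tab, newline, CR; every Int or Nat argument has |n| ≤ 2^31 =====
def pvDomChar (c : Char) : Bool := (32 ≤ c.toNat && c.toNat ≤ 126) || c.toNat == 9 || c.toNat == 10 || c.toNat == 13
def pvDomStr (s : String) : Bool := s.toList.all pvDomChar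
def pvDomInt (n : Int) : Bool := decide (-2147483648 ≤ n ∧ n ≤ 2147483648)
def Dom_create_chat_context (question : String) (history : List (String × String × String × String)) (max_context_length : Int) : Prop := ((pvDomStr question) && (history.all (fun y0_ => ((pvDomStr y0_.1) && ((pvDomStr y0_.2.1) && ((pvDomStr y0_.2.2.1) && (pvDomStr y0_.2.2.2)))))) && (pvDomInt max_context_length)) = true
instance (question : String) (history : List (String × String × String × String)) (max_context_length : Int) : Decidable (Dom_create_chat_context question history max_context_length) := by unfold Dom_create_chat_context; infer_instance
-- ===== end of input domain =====

-- B replaces A's backwards break-and-insert(0) greedy loop by a single chronological pass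
-- keeping an entry exactly when its remaining suffix length fits the cap (objective: alternative).

-- the f-string both Pythons contain verbatim
def pvEntry (q a : String) : String :=
  "Previous Q: " ++ q ++ "\nPrevious A: " ++ PySem.Str.slice a none (some 200) ++ "...\n"

-- ===== PORT A =====
def create_chat_context (question : String) (history : List (String × String × String × String)) (max_context_length : Int) : String :=
  if history = [] then ""
  else
    let st := history.reverse.foldl
      (fun (st : List String × Int × Bool) h =>
        if st.2.2 then st  -- 'break' reached: loop body no longer runs
        else
          let entry := pvEntry h.1 h.2.1
          if st.2.1 + PySem.Str.len entry > max_context_length then (st.1, st.2.1, true)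
          else (PySem.List.insert st.1 0 entry, st.2.1 + PySem.Str.len entry, false))
      ([], 0, false)
    if st.1 ≠ [] then PySem.Str.join "\n" st.1 else ""

-- ===== PORT B =====
def create_chat_context_alt (question : String) (history : List (String × String × String × String)) (max_context_length : Int) : String :=
  let entries := history.map (fun h => pvEntry h.1 h.2.1)
  let remaining := (entries.map PySem.Str.len).sum
  let st := entries.foldl
    (fun (st : List String × Int) e =>
      ((if st.2 ≤ max_context_length then st.1 ++ [e] else st.1), st.2 - PySem.Str.len e))
    ([], remaining)
  PySem.Str.join "\n" st.1

-- ===== PRECONDITION & SPEC =====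
def Spec_create_chat_context (question : String) (history : List (String × String × String × String)) (max_context_length : Int) (out : String) : Prop := out = create_chat_context_alt question history max_context_length
instance (question : String) (history : List (String × String × String × String)) (max_context_length : Int) (out : String) : Decidable (Spec_create_chat_context question history max_context_length out) := by unfold Spec_create_chat_context; infer_instance

-- ===== CLAIM (what is proved, stated in full; the proofs are below) =====
def Claim_equal_create_chat_context : Prop := ∀ (question : String) (history : List (String × String × String × String)) (max_context_length : Int), Dom_create_chat_context question history max_context_length → Spec_create_chat_context question history max_context_length (create_chat_context question history max_context_length)

-- ===== LEMMAS AND PROOFS =====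

def pvSumLen (l : List String) : Int := (l.map PySem.Str.len).sum

theorem pvSumLen_nonneg (l : List String) : 0 ≤ pvSumLen l := by
  induction l with
  | nil => simp [pvSumLen]
  | cons e t ih =>
    have he : 0 ≤ PySem.Str.len e := by rw [PySem.Str.len_eq]; positivity
    simp only [pvSumLen, List.map_cons, List.sum_cons] at *
    omega

-- the entries kept by the suffix-length-threshold scan
def keepSuffix (M : Int) : List String → List String
  | [] => []
  | e :: t => (if pvSumLen (e :: t) ≤ M then [e] else []) ++ keepSuffix M t

theorem keepSuffix_neg (M : Int) (l : List String) (hM : M < 0) : keepSuffix M l = [] := by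
  induction l with
  | nil => rfl
  | cons e t ih =>
    have := pvSumLen_nonneg (e :: t)
    simp only [keepSuffix, if_neg (by omega : ¬ pvSumLen (e :: t) ≤ M), List.nil_append]
    exact ih

theorem keepSuffix_append_singleton (M : Int) (l : List String) (e : String) :
    keepSuffix M (l ++ [e]) =
      keepSuffix (M - PySem.Str.len e) l ++ (if PySem.Str.len e ≤ M then [e] else []) := by
  induction l with
  | nil =>
    simp only [List.nil_append, keepSuffix]
    have : pvSumLen [e] = PySem.Str.len e := by simp [pvSumLen]
    rw [this]
    simp
  | cons x t ih =>
    have hsum : pvSumLen (x :: (t ++ [e])) = pvSumLen (x :: t) + PySem.Str.len e := by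
      simp [pvSumLen, PySem.Str.len_eq]; ring
    simp only [List.cons_append, keepSuffix, ih, hsum]
    have hxt := pvSumLen_nonneg (x :: t)
    have hle : 0 ≤ PySem.Str.len e := by rw [PySem.Str.len_eq]; positivity
    split_ifs with h1 h2 h3 h4 <;> simp_all <;> omega

-- greedy prefix of the reversed entry list that fits under the cap (A's loop semantics)
def pvGreedy (M : Int) : List String → Int → List String
  | [], _ => []
  | e :: es, total =>
    if total + PySem.Str.len e > M then []
    else e :: pvGreedy M es (total + PySem.Str.len e)

-- A's fold with the break flag accumulates exactly the reversed greedy prefix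
theorem foldA_broken (M : Int)
    (l : List (String × String × String × String)) (st : List String × Int × Bool)
    (hb : st.2.2 = true) :
    l.foldl
      (fun (st : List String × Int × Bool) h =>
        if st.2.2 then st
        else
          let entry := pvEntry h.1 h.2.1
          if st.2.1 + PySem.Str.len entry > M then (st.1, st.2.1, true)
          else (PySem.List.insert st.1 0 entry, st.2.1 + PySem.Str.len entry, false))
      st = st := by
  induction l with
  | nil => rfl
  | cons h l ih =>
    rw [List.foldl_cons]
    simp only [hb, if_true]
    exact ih

theorem foldA_eq (M : Int) (l : List (String × String × String × String))
    (parts : List String) (cur : Int) :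
    (l.foldl
      (fun (st : List String × Int × Bool) h =>
        if st.2.2 then st
        else
          let entry := pvEntry h.1 h.2.1
          if st.2.1 + PySem.Str.len entry > M then (st.1, st.2.1, true)
          else (PySem.List.insert st.1 0 entry, st.2.1 + PySem.Str.len entry, false))
      (parts, cur, false)).1
      = (pvGreedy M (l.map (fun h => pvEntry h.1 h.2.1)) cur).reverse ++ parts := by
  induction l generalizing parts cur with
  | nil => simp [pvGreedy]
  | cons h l ih =>
    simp only [List.foldl_cons, List.map_cons, pvGreedy]
    by_cases hc : cur + PySem.Str.len (pvEntry h.1 h.2.1) > M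
    · rw [if_pos hc]
      simp only [if_neg (by simp : ¬ (false = true)), if_pos hc]
      rw [foldA_broken M l _ rfl]
      simp
    · rw [if_neg hc]
      simp only [if_neg (by simp : ¬ (false = true)), if_neg hc]
      rw [ih]
      simp [PySem.List.insert, PySem.List.sliceIndices]

-- the reverse greedy walk selects exactly the suffix-threshold entries
theorem greedy_eq_keepSuffix (M : Int) (l : List String) (t : Int) :
    (pvGreedy M l t).reverse = keepSuffix (M - t) l.reverse := by
  induction l generalizing t with
  | nil => rfl
  | cons e rest ih =>
    simp only [pvGreedy, List.reverse_cons, keepSuffix_append_singleton]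
    by_cases hc : t + PySem.Str.len e > M
    · rw [if_pos hc]
      rw [keepSuffix_neg _ _ (by omega), if_neg (by omega)]
      rfl
    · rw [if_neg hc, List.reverse_cons, ih (t + PySem.Str.len e)]
      rw [show M - (t + PySem.Str.len e) = M - t - PySem.Str.len e from by ring,
        if_pos (by omega)]

-- B's fold accumulates keepSuffix when started at the full suffix length
theorem foldB_eq (M : Int) (es : List String) (acc : List String) :
    (es.foldl
      (fun (st : List String × Int) e =>
        ((if st.2 ≤ M then st.1 ++ [e] else st.1), st.2 - PySem.Str.len e))
      (acc, pvSumLen es)).1 = acc ++ keepSuffix M es := by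
  induction es generalizing acc with
  | nil => simp [keepSuffix]
  | cons e t ih =>
    have hstep : pvSumLen (e :: t) - PySem.Str.len e = pvSumLen t := by
      simp [pvSumLen]
    simp only [List.foldl_cons, keepSuffix, hstep]
    by_cases hc : pvSumLen (e :: t) ≤ M
    · rw [if_pos hc]
      rw [ih (acc ++ [e])]
      simp [hc]
    · rw [if_neg hc]
      rw [ih acc]
      simp [hc]

theorem join_nil_eq : PySem.Str.join "\n" ([] : List String) = "" := by decide

theorem main_eq (question : String) (history : List (String × String × String × String))
    (M : Int) :
    create_chat_context question history M = create_chat_context_alt question history M := by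
  unfold create_chat_context create_chat_context_alt
  set entries := history.map (fun h => pvEntry h.1 h.2.1) with hent
  have hB : (entries.foldl
      (fun (st : List String × Int) e =>
        ((if st.2 ≤ M then st.1 ++ [e] else st.1), st.2 - PySem.Str.len e))
      ([], (entries.map PySem.Str.len).sum)).1 = keepSuffix M entries := by
    have := foldB_eq M entries []
    simpa [pvSumLen] using this
  have hrevmap : history.reverse.map (fun h => pvEntry h.1 h.2.1) = entries.reverse := by
    simp [hent]
  have hA : (history.reverse.foldl
      (fun (st : List String × Int × Bool) h =>
        if st.2.2 then st
        else
          let entry := pvEntry h.1 h.2.1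
          if st.2.1 + PySem.Str.len entry > M then (st.1, st.2.1, true)
          else (PySem.List.insert st.1 0 entry, st.2.1 + PySem.Str.len entry, false))
      ([], 0, false)).1 = keepSuffix M entries := by
    rw [foldA_eq, hrevmap]
    have := greedy_eq_keepSuffix M entries.reverse 0
    simpa using this
  by_cases hh : history = []
  · subst hh
    simp only [hent, List.map_nil] at hB ⊢
    rw [hB]
    simp [keepSuffix, join_nil_eq]
  · rw [if_neg hh]
    simp only [hA, hB]
    by_cases hp : keepSuffix M entries = []
    · rw [hp, if_neg (by simp), join_nil_eq]
    · rw [if_pos hp]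

-- ===== VERDICT (by name: the statement is the Claim_ definition above) =====
theorem create_chat_context_spec : Claim_equal_create_chat_context := by
  intro question history M _
  unfold Spec_create_chat_context
  exact main_eq question history M
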